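-- pv_equiv track=rewrite | github.com/Carbonferrous/Python | numbertheory.py | totientList
-- ===== SOURCE A (Python) =====
-- def primeList(n):
--     m = (n - 1) // 2
--     if m < 0:
--         return
--     B = [True] * m
--     i = 0
--     p = 3
--     if n > 1:
--         yield 2
--
--     while n >= p ** 2:
--         if B[i]:
--             yield p
--             j = 2*i**2+6*i+3
--             B[j::2*i+3] = [False] * len(B[j::2*i+3])
--         i += 1
--         p += 2
--     for x in range(i, m):
--         if B[x]:
--             yield p + 2 * (x - i)
--
-- def totientList(n):
--     if n <= 0:
--         yield 0
--         return
--     elif n == 1: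
--         yield 0
--         yield 1
--         return
--     else:
--         pass
--     divList = list(range(n+1))
--     yield 0
--     yield divList[1]
--     x = 2
--     for div in primeList(n):
--         for i in range(div, n+1, div):
--             divList[i] = divList[i] * (div - 1) // div
--         while x <= div:
--             yield divList[x]
--             x += 1
--     while x <= n:
--         yield divList[x]
--         x += 1
-- ===== SOURCE B (Python) =====
-- def totientList(n):
--     if n <= 0:
--         yield 0
--         return
--     phi = list(range(n + 1))
--     for p in range(2, n + 1):
--         if phi[p] == p:  # p is prime: untouched by any smaller prime
--             for j in range(p, n + 1, p):
--                 phi[j] = phi[j] * (p - 1) // p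
--     yield 0
--     yield 1
--     for k in range(2, n + 1):
--         yield phi[k]
-- ===== Notes on version B (the rewrite author's own statement) =====
-- stated objective: simpler
-- what changed: A interleaves a generator implementing an odd-only bitmask Eratosthenes sieve (with slice assignment) with a totient-update loop that yields results incrementally; B is one plain pass over a single phi array that detects each prime directly by phi[p] == p, applies the same totient update, and emits the whole result list at the end.
import Mathlib
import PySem

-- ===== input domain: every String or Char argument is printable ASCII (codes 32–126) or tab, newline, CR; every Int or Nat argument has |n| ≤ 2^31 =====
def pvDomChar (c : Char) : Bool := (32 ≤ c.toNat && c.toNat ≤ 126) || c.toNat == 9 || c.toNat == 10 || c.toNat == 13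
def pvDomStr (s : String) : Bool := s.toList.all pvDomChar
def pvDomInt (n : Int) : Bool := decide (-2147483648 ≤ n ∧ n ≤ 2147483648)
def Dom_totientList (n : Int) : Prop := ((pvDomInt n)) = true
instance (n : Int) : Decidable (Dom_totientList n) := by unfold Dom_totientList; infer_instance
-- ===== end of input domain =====

-- B replaces A's interleaved generator pair (odd-only bitmask Eratosthenes sieve feeding a
-- totient update loop) by one plain pass over a single phi array: p is prime exactly when
-- phi[p] is still p, then the same totient update is applied and the whole result list is
-- emitted at the end — simpler, no separate prime generator.

-- ===== PORT A =====
-- slice assignment B[j::2*i+3] = [False]*len(B[j::2*i+3])  (hand port, exact: sets indices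
-- j, j+step, … to False; the step is passed as s with step = s+1 so the recursion terminates)
def markFalse (B : List Bool) (j s : Nat) : List Bool :=
  if h : j < B.length then markFalse (B.set j false) (j + (s+1)) s else B
termination_by B.length - j
decreasing_by simp; omega

-- the 'while n >= p ** 2' loop of primeList; returns (yields, final B, final i); p = 3+2*i
def sieveLoop (n : Int) (B : List Bool) (i : Nat) : List Int × List Bool × Nat :=
  if h : (3 + 2*(i:Int))^2 ≤ n then
    if B.getD i false then
      let out := sieveLoop n (markFalse B (2*i^2+6*i+3) (2*i+2)) (i+1)
      ((3 + 2*(i:Int)) :: out.1, out.2)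
    else sieveLoop n B (i+1)
  else ([], B, i)
termination_by (n + 1 - (3 + 2*(i:Int))^2).toNat
decreasing_by
  · have e : (3 + 2*((i:Int)+1))^2 = (3 + 2*(i:Int))^2 + 8*(i:Int) + 16 := by ring
    push_cast; omega
  · have e : (3 + 2*((i:Int)+1))^2 = (3 + 2*(i:Int))^2 + 8*(i:Int) + 16 := by ring
    push_cast; omega

-- port of the generator primeList (the list of its yields, in order)
def primeListPort (n : Int) : List Int :=
  let m := PySem.Int.floordiv (n-1) 2
  if m < 0 then [] else
  let B := List.replicate m.toNat true
  let init : List Int := if n > 1 then [2] else []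
  let r := sieveLoop n B 0
  let tail := (PySem.List.pyRange (r.2.2 : Int) m 1).foldl (fun acc x =>
      if r.2.1.getD x.toNat false then acc ++ [(3 + 2*(r.2.2:Int)) + 2*(x - (r.2.2:Int))] else acc) []
  init ++ r.1 ++ tail

-- for i in range(div, n+1, div): divList[i] = divList[i] * (div - 1) // div
-- (this inner loop is textually identical in A and in B, so both ports share it)
def updMult (dl : List Int) (dv n : Int) : List Int :=
  (PySem.List.pyRange dv (n+1) dv).foldl
    (fun dl i => dl.set i.toNat (PySem.Int.floordiv (dl.getD i.toNat 0 * (dv - 1)) dv)) dl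

-- while x <= b: yield divList[x]; x += 1   (returns final x and the yields appended to out)
def emitWhile (dl : List Int) (x b : Int) (out : List Int) : Int × List Int :=
  if x ≤ b then emitWhile dl (x+1) b (out ++ [dl.getD x.toNat 0]) else (x, out)
termination_by (b + 1 - x).toNat
decreasing_by omega

def totientList (n : Int) : List Int :=
  if n ≤ 0 then [0]
  else if n = 1 then [0, 1]
  else
    let divList : List Int := (List.range (n.toNat+1)).map Int.ofNat
    let out : List Int := [0, divList.getD 1 0]
    let st := (primeListPort n).foldl
      (fun (st : List Int × Int × List Int) dv =>
        let dl := updMult st.1 dv n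
        let e := emitWhile dl st.2.1 dv st.2.2
        (dl, e.1, e.2)) (divList, 2, out)
    (emitWhile st.1 st.2.1 n st.2.2).2

-- ===== PORT B =====
def totientList_alt (n : Int) : List Int :=
  if n ≤ 0 then [0]
  else
    let phi0 : List Int := (List.range (n.toNat+1)).map Int.ofNat
    let phi := (PySem.List.pyRange 2 (n+1) 1).foldl
      (fun phi p => if phi.getD p.toNat 0 == p then updMult phi p n else phi) phi0
    [0, 1] ++ (PySem.List.pyRange 2 (n+1) 1).map (fun k => phi.getD k.toNat 0)

-- ===== PRECONDITION & SPEC =====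
def Spec_totientList (n : Int) (out : List Int) : Prop := out = totientList_alt n
instance (n : Int) (out : List Int) : Decidable (Spec_totientList n out) := by unfold Spec_totientList; infer_instance

-- ===== CLAIM (what is proved, stated in full; the proofs are below) =====
def Claim_equal_totientList : Prop := ∀ (n : Int), Dom_totientList n → Spec_totientList n (totientList n)

-- ===== LEMMAS AND PROOFS =====

-- the totient array after applying the update loop for every p in ps
def fphi (n : Int) (dl : List Int) (ps : List Int) : List Int :=
  ps.foldl (fun dl p => updMult dl p n) dl

-- index t (number 3+2t) is struck out by the sieve step of index t' (prime 3+2t')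
def markedBy (t x : Nat) : Bool :=
  decide (Nat.Prime (3+2*t)) && decide ((3+2*t) ∣ (3+2*x)) && decide ((3+2*t)^2 ≤ 3+2*x)

def marked (i x : Nat) : Bool := (List.range i).any (fun t => markedBy t x)

def sieveInv (M i : Nat) (B : List Bool) : Prop :=
  B.length = M ∧ ∀ x, B.getD x false = (decide (x < M) && !marked i x)

def sieveOut (i I : Nat) : List Int :=
  ((List.range' i (I - i) 1).filter (fun t => decide (Nat.Prime (3+2*t)))).map
    (fun (t : Nat) => (3:Int)+2*(t:Int))

theorem foldl_set_getD (ms : List Int) (f : List Int → Int → Int) (j : Nat)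
    (hm : ∀ i ∈ ms, i.toNat ≠ j) :
    ∀ dl : List Int, (ms.foldl (fun dl i => dl.set i.toNat (f dl i)) dl).getD j 0 = dl.getD j 0 := by
  induction ms with
  | nil => intro dl; rfl
  | cons i ms ih =>
    intro dl
    rw [List.foldl_cons, ih (fun a ha => hm a (List.mem_cons_of_mem _ ha))]
    simp [List.getD_eq_getElem?_getD, List.getElem?_set_ne (hm i (List.mem_cons_self))]

theorem updMult_getD_lt (dl : List Int) (dv n : Int) (j : Nat) (h2 : 2 ≤ dv) (hj : (j:Int) < dv) :
    (updMult dl dv n).getD j 0 = dl.getD j 0 := by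
  unfold updMult
  refine foldl_set_getD _ _ _ ?_ dl
  intro i hi
  rw [PySem.List.mem_pyRange_iff_of_pos (by omega)] at hi
  omega

theorem fphi_getD_lt (n : Int) (dl : List Int) (ps : List Int) (j : Nat)
    (h : ∀ p ∈ ps, 2 ≤ p ∧ (j:Int) < p) :
    (fphi n dl ps).getD j 0 = dl.getD j 0 := by
  induction ps generalizing dl with
  | nil => rfl
  | cons p ps ih =>
    rw [fphi, List.foldl_cons, ← fphi,
      ih (updMult dl p n) (fun a ha => h a (List.mem_cons_of_mem _ ha))]
    exact updMult_getD_lt dl p n j (h p List.mem_cons_self).1 (h p List.mem_cons_self).2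

theorem emitWhile_spec (dl : List Int) (x b : Int) (out : List Int) :
    emitWhile dl x b out
      = (max x (b+1), out ++ (PySem.List.pyRange x (b+1) 1).map (fun i => dl.getD i.toNat 0)) := by
  fun_induction emitWhile with
  | case1 x out h ih =>
    rw [ih, PySem.List.pyRange_one_cons (show x < b+1 by omega)]
    simp
    omega
  | case2 x out h =>
    rw [PySem.List.pyRange_one_eq_nil (by omega)]
    simp
    omega

theorem markFalse_length (B : List Bool) (j s : Nat) : (markFalse B j s).length = B.length := by
  fun_induction markFalse with
  | case1 B j h ih => simpa using ih
  | case2 B j h => rfl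

theorem markFalse_getD (B : List Bool) (j s : Nat) (x : Nat) :
    (markFalse B j s).getD x false
      = (B.getD x false && !decide (j ≤ x ∧ (s+1) ∣ (x - j))) := by
  fun_induction markFalse with
  | case2 B j h =>
    by_cases hx : x < B.length
    · have : ¬ (j ≤ x ∧ (s+1) ∣ (x - j)) := by intro ⟨h1, _⟩; omega
      simp [this]
    · rw [List.getD_eq_default _ _ (by omega)]; simp
  | case1 B j h ih =>
    rw [ih]
    by_cases hx : x = j
    · subst hx
      have : (B.set x false).getD x false = false := by
        simp [List.getD_eq_getElem?_getD, List.getElem?_set_self (by omega)]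
      rw [this]
      simp
    · have hset : (B.set j false).getD x false = B.getD x false := by
        simp [List.getD_eq_getElem?_getD, List.getElem?_set_ne (by omega : j ≠ x)]
      rw [hset]
      congr 1
      rw [Bool.not_inj_iff, decide_eq_decide]
      constructor
      · rintro ⟨h1, h2⟩
        refine ⟨by omega, ?_⟩
        have e : x - j = (x - (j + (s+1))) + (s+1) := by omega
        rw [e]; exact Nat.dvd_add h2 dvd_rfl
      · rintro ⟨h1, h2⟩
        have hge : s+1 ≤ x - j := Nat.le_of_dvd (by omega) h2
        refine ⟨by omega, ?_⟩
        have e : x - (j + (s+1)) = (x - j) - (s+1) := by omega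
        rw [e]; exact Nat.dvd_sub h2 dvd_rfl

theorem markedBy_eq_true_iff (t x : Nat) :
    markedBy t x = true ↔ Nat.Prime (3+2*t) ∧ (3+2*t) ∣ (3+2*x) ∧ (3+2*t)^2 ≤ 3+2*x := by
  simp [markedBy, and_assoc]

theorem marked_eq_true_iff' (i x : Nat) :
    marked i x = true ↔ ∃ t, t < i ∧ Nat.Prime (3+2*t) ∧ (3+2*t) ∣ (3+2*x) ∧ (3+2*t)^2 ≤ 3+2*x := by
  simp [marked, markedBy_eq_true_iff, List.any_eq_true]

theorem marked_succ (i x : Nat) : marked (i+1) x = (marked i x || markedBy i x) := by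
  simp [marked, List.range_succ]

theorem marked_eq_true_iff (i x : Nat) (hb : 3+2*x < (3+2*i)^2) :
    marked i x = true ↔ ¬ Nat.Prime (3+2*x) := by
  rw [marked_eq_true_iff']
  constructor
  · rintro ⟨t, ht, h1, h2, h3⟩ hp
    have hne : 3+2*t ≠ 3+2*x := by
      intro he
      rw [he] at h3; nlinarith
    have := (Nat.Prime.eq_one_or_self_of_dvd hp _ h2)
    omega
  · intro hp
    have hx1 : 3+2*x ≠ 1 := by omega
    have hq := Nat.minFac_prime hx1
    have hdvd := Nat.minFac_dvd (3+2*x)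
    have hsq : (3+2*x).minFac ^ 2 ≤ 3+2*x := Nat.minFac_sq_le_self (by omega) hp
    set q := (3+2*x).minFac with hqdef
    have hodd : q ≠ 2 := by
      intro h2
      have : (2:Nat) ∣ 3+2*x := h2 ▸ hdvd
      omega
    have hq2 : 2 ≤ q := hq.two_le
    have hqodd : q % 2 = 1 := by
      rcases Nat.even_or_odd q with he | ho
      · exfalso
        have h2q : (2:Nat) ∣ q := he.two_dvd
        have : (2:Nat) ∣ 3+2*x := h2q.trans hdvd
        omega
      · exact Nat.odd_iff.mp ho
    have hqsq : q ^ 2 < (3+2*i)^2 := by omega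
    have hqlt : q < 3+2*i := by
      by_contra hc
      rw [not_lt] at hc
      have : (3+2*i)^2 ≤ q^2 := Nat.pow_le_pow_left hc 2
      omega
    refine ⟨(q-3)/2, by omega, ?_, ?_, ?_⟩ <;>
      · have he : 3 + 2*((q-3)/2) = q := by omega
        rw [he]
        first | exact hq | exact hdvd | exact hsq

theorem two_i_three_odd (i : Nat) : (2*i+3).Coprime 2 :=
  (Nat.coprime_mul_left_add_left 3 2 i).mpr rfl

theorem markedBy_eq (i x : Nat) (hp : Nat.Prime (3+2*i)) :
    markedBy i x = decide ((2*i^2+6*i+3) ≤ x ∧ (2*i+3) ∣ (x - (2*i^2+6*i+3))) := by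
  have hsq : (3+2*i)^2 = 2*(2*i^2+6*i+3)+3 := by ring
  rw [Bool.eq_iff_iff, markedBy_eq_true_iff, decide_eq_true_iff]
  set j := 2*i^2+6*i+3 with hj
  constructor
  · rintro ⟨-, hdvd, hle⟩
    have hle2 : 2*j+3 ≤ 3+2*x := hsq ▸ hle
    have hjx : j ≤ x := by omega
    refine ⟨hjx, ?_⟩
    have hdj : (3+2*i) ∣ (3+2*j) := ⟨3+2*i, by simp only [hj]; ring⟩
    have h2 : (3+2*i) ∣ (3+2*x) - (3+2*j) := Nat.dvd_sub hdvd hdj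
    have h3 : (3+2*x) - (3+2*j) = (x - j)*2 := by omega
    rw [h3] at h2
    have h2' : (2*i+3) ∣ (x-j)*2 := by
      have e : 2*i+3 = 3+2*i := by omega
      rw [e]; exact h2
    exact (two_i_three_odd i).dvd_of_dvd_mul_right h2'
  · rintro ⟨hjx, hdvd⟩
    refine ⟨hp, ?_, by omega⟩
    have h1 : (2*i+3) ∣ (x - j)*2 := Dvd.dvd.mul_right hdvd 2
    have h2 : (3+2*x) = (x-j)*2 + (3+2*j) := by omega
    have h3 : (2*i+3) ∣ (3+2*j) := ⟨2*i+3, by simp only [hj]; ring⟩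
    have : (2*i+3) ∣ (3+2*x) := by rw [h2]; exact Nat.dvd_add h1 h3
    have he : 3+2*i = 2*i+3 := by omega
    rw [he]; exact this

theorem sieve_spec (n : Int) (M : Nat) (h1 : 2*(M:Int)+1 ≤ n) (h2 : n ≤ 2*(M:Int)+2) :
    ∀ i B, i ≤ M → sieveInv M i B →
      ∃ I Bf, sieveLoop n B i = (sieveOut i I, Bf, I) ∧ i ≤ I ∧ I ≤ M ∧
        n < (3+2*(I:Int))^2 ∧ sieveInv M I Bf := by
  intro i B
  fun_induction sieveLoop n B i with
  | case1 B i hcond hB out ih =>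
    intro hiM hinv
    have hsqle : (3+2*(i:Int)) ≤ (3+2*(i:Int))^2 := by nlinarith [Int.natCast_nonneg i]
    have hiM' : i < M := by omega
    have hmi : marked i i = false := by
      have := hinv.2 i
      rw [hB] at this
      simp only [hiM', decide_true, Bool.true_and] at this
      cases hmm : marked i i
      · rfl
      · rw [hmm] at this; simp at this
    have hprime : Nat.Prime (3+2*i) := by
      by_contra hnp
      rw [← marked_eq_true_iff i i (by nlinarith)] at hnp
      rw [hmi] at hnp; exact absurd hnp (by simp)
    have hinv' : sieveInv M (i+1) (markFalse B (2*i^2+6*i+3) (2*i+2)) := by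
      constructor
      · rw [markFalse_length]; exact hinv.1
      · intro x
        rw [markFalse_getD, hinv.2 x, marked_succ, markedBy_eq i x hprime]
        cases hxM : decide (x < M) <;> cases hm : marked i x <;>
          cases hc : decide (2*i^2+6*i+3 ≤ x ∧ 2*i+3 ∣ (x - (2*i^2+6*i+3))) <;> simp_all
    obtain ⟨I, Bf, heq, hii, hIM, hn, hinvf⟩ := ih (by omega) hinv'
    refine ⟨I, Bf, ?_, by omega, hIM, hn, hinvf⟩
    have heq' : out = (sieveOut (i+1) I, Bf, I) := heq
    rw [heq']
    simp only [sieveOut]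
    have hr : List.range' i (I - i) 1 = i :: List.range' (i+1) (I - (i+1)) 1 := by
      have : I - i = (I - (i+1)) + 1 := by omega
      rw [this, List.range'_succ]
    rw [hr]
    simp [hprime]
  | case2 B i hcond hB ih =>
    intro hiM hinv
    have hsqle : (3+2*(i:Int)) ≤ (3+2*(i:Int))^2 := by nlinarith [Int.natCast_nonneg i]
    have hiM' : i < M := by omega
    have hBf : B.getD i false = false := by
      cases hbv : B.getD i false
      · rfl
      · exact absurd hbv hB
    have hmi : marked i i = true := by
      have := hinv.2 i
      rw [hBf] at this
      simp only [hiM', decide_true, Bool.true_and] at this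
      cases hmm : marked i i
      · rw [hmm] at this; simp at this
      · rfl
    have hnp : ¬ Nat.Prime (3+2*i) := (marked_eq_true_iff i i (by nlinarith)).mp hmi
    have hinv' : sieveInv M (i+1) B := by
      refine ⟨hinv.1, fun x => ?_⟩
      rw [hinv.2 x, marked_succ]
      have : markedBy i x = false := by
        simp [markedBy, hnp]
      rw [this, Bool.or_false]
    obtain ⟨I, Bf, heq, hii, hIM, hn, hinvf⟩ := ih (by omega) hinv'
    refine ⟨I, Bf, ?_, by omega, hIM, hn, hinvf⟩
    rw [heq]
    simp only [sieveOut]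
    have hr : List.range' i (I - i) 1 = i :: List.range' (i+1) (I - (i+1)) 1 := by
      have : I - i = (I - (i+1)) + 1 := by omega
      rw [this, List.range'_succ]
    rw [hr]
    simp [hnp]
  | case3 B i hcond =>
    intro hiM hinv
    refine ⟨i, B, ?_, le_refl i, hiM, by omega, hinv⟩
    simp [sieveOut]theorem filterMapCast {α β γ : Type} (l : List α) (f : α → β) (p : β → Bool) (F : β → γ)
    (q : α → Bool) (g : α → γ)
    (hp : ∀ k ∈ l, p (f k) = q k) (hg : ∀ k ∈ l, F (f k) = g k) :
    ((l.map f).filter p).map F = (l.filter q).map g := by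
  induction l with
  | nil => rfl
  | cons a l ih =>
    have hp' := hp a List.mem_cons_self
    have hg' := hg a List.mem_cons_self
    have ihe := ih (fun k hk => hp k (List.mem_cons_of_mem _ hk))
      (fun k hk => hg k (List.mem_cons_of_mem _ hk))
    simp only [List.map_cons, List.filter_cons, hp']
    cases hq : q a
    · simp [ihe]
    · simp [hg', ihe]

theorem not_prime_even (K : Nat) : ¬ Nat.Prime (4+2*K) := by
  intro hp
  rcases hp.eq_two_or_odd with h | h <;> omega

theorem oddFilter (K : Nat) :
    (List.range' 3 (2*K) 1).filter (fun k => decide (Nat.Prime k))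
      = ((List.range K).filter (fun t => decide (Nat.Prime (3+2*t)))).map (fun t => 3+2*t) := by
  induction K with
  | zero => rfl
  | succ K ih =>
    have hsplit : List.range' 3 (2*(K+1)) 1 = List.range' 3 (2*K) 1 ++ [3+2*K, 4+2*K] := by
      have h1 : List.range' 3 (2*K) 1 ++ List.range' (3+1*(2*K)) 2 1 = List.range' 3 (2*K+2) 1 :=
        List.range'_append
      have h2 : List.range' (3+1*(2*K)) 2 1 = [3+2*K, 4+2*K] := by
        simp [List.range']
        omega
      rw [h2] at h1
      rw [show 2*(K+1) = 2*K+2 by omega, ← h1]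
    rw [hsplit, List.filter_append, List.range_succ, List.filter_append, ih]
    by_cases hp : Nat.Prime (3+2*K)
    · simp [hp, not_prime_even K]
    · simp [hp, not_prime_even K]

theorem evenDrop (N M : Nat) (hN : 2 ≤ N) (hM : M = (N-1)/2) :
    (List.range' 3 (N-2) 1).filter (fun k => decide (Nat.Prime k))
      = (List.range' 3 (2*M) 1).filter (fun k => decide (Nat.Prime k)) := by
  rcases Nat.even_or_odd N with he | ho
  · have : N - 2 = 2*M := by
      obtain ⟨t, ht⟩ := he; omega
    rw [this]
  · have h2m : 2*M = (N-2)+1 := by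
      obtain ⟨t, ht⟩ := ho; omega
    rw [h2m, List.range'_concat, List.filter_append]
    have hnp : ¬ Nat.Prime (3+1*(N-2)) := by
      have he2 : 3+1*(N-2) = 4+2*((N-3)/2) := by obtain ⟨t, ht⟩ := ho; omega
      rw [he2]; exact not_prime_even _
    simp only [one_mul] at hnp
    simp [hnp]

theorem primeListPort_eq (n : Int) (hn : 2 ≤ n) :
    primeListPort n
      = ((List.range (n.toNat+1)).filter (fun k => decide (Nat.Prime k))).map Int.ofNat := by
  have hnN : n = (n.toNat : Int) := by omega
  set N := n.toNat with hNdef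
  set M := (N-1)/2 with hMdef
  have hN2 : 2 ≤ N := by omega
  have hm : PySem.Int.floordiv (n-1) 2 = (M:Int) := by
    have he : n - 1 = ((N-1 : Nat) : Int) := by omega
    rw [he, hMdef]
    exact_mod_cast PySem.Int.floordiv_natCast (N-1) 2
  -- invariant at entry
  have hinv0 : sieveInv M 0 (List.replicate M true) := by
    refine ⟨List.length_replicate, fun x => ?_⟩
    have hm0 : marked 0 x = false := by simp [marked]
    rw [hm0]
    by_cases hx : x < M
    · rw [List.getD_replicate _ hx]; simp [hx]
    · rw [List.getD_eq_default _ _ (by simp; omega)]; simp; omega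
  obtain ⟨I, Bf, heq, hI0, hIM, hn2, hinvf⟩ :=
    sieve_spec n M (by omega) (by omega) 0 (List.replicate M true) (by omega) hinv0
  -- unfold the port
  unfold primeListPort
  simp only [hm, Int.toNat_natCast]
  rw [if_neg (by omega : ¬ (M:Int) < 0)]
  rw [if_pos (by omega : n > 1)]
  rw [heq]
  simp only [PySem.List.foldl_append_if]
  rw [List.nil_append]
  -- now the tail
  have hb3 : ∀ x : Nat, x < M → (Bf.getD x false) = decide (Nat.Prime (3+2*x)) := by
    intro x hx
    have hxb : (3:Nat)+2*x < (3+2*I)^2 := by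
      have h1 : ((3:Int)+2*(x:Int)) ≤ 2*(M:Int)+1 := by omega
      have h2 : ((3:Int)+2*(I:Int))^2 = (((3+2*I)^2 : Nat) : Int) := by push_cast; ring
      have h3 : ((3:Nat)+2*x : Int) < (((3+2*I)^2 : Nat) : Int) := by
        push_cast at *; omega
      exact_mod_cast h3
    have := hinvf.2 x
    rw [this]
    simp only [hx, decide_true, Bool.true_and]
    rcases hp : decide (Nat.Prime (3+2*x)) with _ | _
    · have : marked I x = true := (marked_eq_true_iff I x hxb).mpr (by simpa using hp)
      rw [this]; rfl
    · have : marked I x = false := by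
        cases hmm : marked I x
        · rfl
        · exact absurd ((marked_eq_true_iff I x hxb).mp hmm) (by simpa using hp)
      rw [this]; rfl
  have htail :
      ((PySem.List.pyRange (I:Int) (M:Int) 1).filter (fun x => Bf.getD x.toNat false)).map
          (fun x => (3 + 2*(I:Int)) + 2*(x - (I:Int)))
        = ((List.range' I (M-I) 1).filter (fun t => decide (Nat.Prime (3+2*t)))).map
            (fun (t : Nat) => (3:Int)+2*(t:Int)) := by
    rw [PySem.List.pyRange_one]
    rw [show (((M:Int)) - (I:Int)).toNat = M - I by omega]
    rw [List.range'_eq_map_range]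
    rw [filterMapCast (List.range (M-I)) (fun k => (I:Int)+(k:Nat)) _ _
        (fun (k : Nat) => decide (Nat.Prime (3+2*(I+k)))) (fun (k : Nat) => (3:Int)+2*(((I+k : Nat)) : Int))
        (by
          intro k hk
          show Bf.getD ((I:Int)+(k:Int)).toNat false = _
          rw [show ((I:Int)+(k:Int)).toNat = I + k by omega]
          exact hb3 (I+k) (by rw [List.mem_range] at hk; omega))
        (by
          intro k hk
          show (3 + 2*(I:Int)) + 2*(((I:Int)+(k:Int)) - (I:Int)) = _
          push_cast
          ring)]
    rw [filterMapCast (List.range (M-I)) (fun k => I+k) _ _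
        (fun (k : Nat) => decide (Nat.Prime (3+2*(I+k)))) (fun (k : Nat) => (3:Int)+2*(((I+k : Nat)) : Int))
        (by intro k hk; rfl) (by intro k hk; rfl)]
  rw [htail]
  rw [List.append_assoc]
  have hco : sieveOut 0 I ++ ((List.range' I (M-I) 1).filter (fun t => decide (Nat.Prime (3+2*t)))).map
        (fun (t : Nat) => (3:Int)+2*(t:Int))
      = ((List.range M).filter (fun t => decide (Nat.Prime (3+2*t)))).map (fun (t : Nat) => (3:Int)+2*(t:Int)) := by
    rw [sieveOut, Nat.sub_zero, ← List.map_append, ← List.filter_append]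
    have : List.range' 0 I 1 ++ List.range' I (M-I) 1 = List.range M := by
      have h0 : List.range' 0 I 1 ++ List.range' (0+1*I) (M-I) 1 = List.range' 0 (I+(M-I)) 1 :=
        List.range'_append
      simp only [Nat.zero_add, Nat.one_mul] at h0
      rw [h0, show I+(M-I) = M by omega, ← List.range_eq_range']
    rw [this]
  rw [hco]
  -- right-hand side
  have hrhs : ((List.range (N+1)).filter (fun k => decide (Nat.Prime k))).map Int.ofNat
      = (2:Int) :: ((List.range M).filter (fun t => decide (Nat.Prime (3+2*t)))).map
          (fun (t : Nat) => (3:Int)+2*(t:Int)) := by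
    have hsplit : List.range (N+1) = List.range' 0 3 1 ++ List.range' 3 (N-2) 1 := by
      have h0 : List.range' 0 3 1 ++ List.range' (0+1*3) (N-2) 1 = List.range' 0 (3+(N-2)) 1 :=
        List.range'_append
      simp only [Nat.zero_add, Nat.one_mul] at h0
      rw [List.range_eq_range', show N+1 = 3+(N-2) by omega, ← h0]
    rw [hsplit, List.filter_append]
    have h012 : (List.range' 0 3 1).filter (fun k => decide (Nat.Prime k)) = [2] := by decide
    rw [h012, evenDrop N M hN2 hMdef, oddFilter M, List.map_append, List.map_map]
    simp only [List.map_cons]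
    congr 1
  rw [hrhs]
  rfl

theorem foldl_max1_le_self (ps : List Int) (a : Int) :
    a ≤ ps.foldl (fun a p => max a (p+1)) a := by
  induction ps generalizing a with
  | nil => exact le_refl a
  | cons p ps ih => exact le_trans (le_max_left a (p+1)) (ih (max a (p+1)))

theorem foldl_max1_le (ps : List Int) (a c : Int) (h : ∀ p ∈ ps, p + 1 ≤ c) (ha : a ≤ c) :
    ps.foldl (fun a p => max a (p+1)) a ≤ c := by
  induction ps generalizing a with
  | nil => exact ha
  | cons p ps ih =>
    exact ih (max a (p+1)) (fun q hq => h q (List.mem_cons_of_mem _ hq))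
      (max_le ha (h p List.mem_cons_self))

theorem foldA_spec (n : Int) : ∀ (ps : List Int) (dl : List Int) (x : Int) (out : List Int),
    ps.Pairwise (· < ·) → (∀ p ∈ ps, 2 ≤ p ∧ x ≤ p + 1) → 2 ≤ x →
    ps.foldl (fun (st : List Int × Int × List Int) dv =>
        let dl := updMult st.1 dv n
        let e := emitWhile dl st.2.1 dv st.2.2
        (dl, e.1, e.2)) (dl, x, out)
      = (fphi n dl ps,
         ps.foldl (fun a p => max a (p+1)) x,
         out ++ (PySem.List.pyRange x (ps.foldl (fun a p => max a (p+1)) x) 1).map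
            (fun i => (fphi n dl ps).getD i.toNat 0)) := by
  intro ps
  induction ps with
  | nil =>
    intro dl x out _ _ _
    simp [fphi, PySem.List.pyRange_one_eq_nil (le_refl x)]
  | cons p ps ih =>
    intro dl x out hpw hb hx2
    have hple : x ≤ p + 1 := (hb p List.mem_cons_self).2
    have hp2 : 2 ≤ p := (hb p List.mem_cons_self).1
    have hmax : max x (p+1) = p+1 := by omega
    rw [List.foldl_cons]
    show List.foldl _ (updMult dl p n, (emitWhile (updMult dl p n) x p out).1,
      (emitWhile (updMult dl p n) x p out).2) ps = _
    rw [emitWhile_spec]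
    simp only [hmax]
    rw [ih (updMult dl p n) (p+1) _ (List.Pairwise.of_cons hpw)
      (fun q hq => ⟨(hb q (List.mem_cons_of_mem _ hq)).1,
        by have := (List.rel_of_pairwise_cons hpw hq); omega⟩) (by omega)]
    have hXge : p + 1 ≤ ps.foldl (fun a p => max a (p+1)) (p+1) := foldl_max1_le_self ps (p+1)
    set X := ps.foldl (fun a p => max a (p+1)) (p+1) with hX
    have hfold : (p :: ps).foldl (fun a p => max a (p+1)) x = X := by
      rw [List.foldl_cons, hmax]
    rw [hfold]
    have hphi : fphi n dl (p :: ps) = fphi n (updMult dl p n) ps := by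
      rw [fphi, List.foldl_cons]; rfl
    rw [hphi]
    have hmapeq : (PySem.List.pyRange x (p+1) 1).map (fun i => (updMult dl p n).getD i.toNat 0)
        = (PySem.List.pyRange x (p+1) 1).map (fun i => (fphi n (updMult dl p n) ps).getD i.toNat 0) := by
      apply List.map_congr_left
      intro i hi
      rw [PySem.List.mem_pyRange_one] at hi
      rw [fphi_getD_lt]
      intro q hq
      refine ⟨(hb q (List.mem_cons_of_mem _ hq)).1, ?_⟩
      have := (List.rel_of_pairwise_cons hpw hq)
      omega
    rw [hmapeq, List.append_assoc, ← List.map_append,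
      ← PySem.List.pyRange_one_append x (p+1) X hple hXge]

-- ---- B-side machinery: phi[p] == p detects primes ----
def stepB (n : Int) : List Int → Int → List Int :=
  fun phi p => if phi.getD p.toNat 0 == p then updMult phi p n else phi

-- primes below a, as the Int list B's updates follow
def prl (a : Nat) : List Int :=
  ((List.range a).filter (fun k => decide (Nat.Prime k))).map Int.ofNat

theorem prl_mem (a : Nat) (q : Int) (hq : q ∈ prl a) :
    ∃ m : Nat, q = Int.ofNat m ∧ Nat.Prime m ∧ m < a := by
  rw [prl, List.mem_map] at hq
  obtain ⟨m, hm, rfl⟩ := hq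
  rw [List.mem_filter, List.mem_range] at hm
  exact ⟨m, rfl, by simpa using hm.2, hm.1⟩

theorem foldl_set_length (ms : List Int) (f : List Int → Int → Int) :
    ∀ dl : List Int, (ms.foldl (fun dl i => dl.set i.toNat (f dl i)) dl).length = dl.length := by
  induction ms with
  | nil => intro dl; rfl
  | cons i ms ih => intro dl; rw [List.foldl_cons, ih]; simp

theorem updMult_length (dl : List Int) (dv n : Int) : (updMult dl dv n).length = dl.length := by
  unfold updMult
  exact foldl_set_length _ _ dl

theorem fphi_length (n : Int) (dl : List Int) (ps : List Int) :
    (fphi n dl ps).length = dl.length := by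
  induction ps generalizing dl with
  | nil => rfl
  | cons p ps ih => rw [fphi, List.foldl_cons, ← fphi, ih, updMult_length]

theorem updMult_getD_not_dvd (dl : List Int) (q n : Int) (k : Nat)
    (hq : 2 ≤ q) (h : ¬ q ∣ (k:Int)) :
    (updMult dl q n).getD k 0 = dl.getD k 0 := by
  unfold updMult
  refine foldl_set_getD _ _ _ ?_ dl
  intro i hi hik
  rw [PySem.List.mem_pyRange_iff_of_pos (by omega)] at hi
  obtain ⟨h1, h2, h3⟩ := hi
  apply h
  have hik' : i = (k:Int) := by omega
  rw [← hik']
  have : q ∣ i - q + q := Dvd.dvd.add h3 dvd_rfl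
  simpa using this

theorem fphi_getD_not_dvd (n : Int) (ps : List Int) (k : Nat)
    (h : ∀ q ∈ ps, 2 ≤ q ∧ ¬ q ∣ (k:Int)) :
    ∀ dl : List Int, (fphi n dl ps).getD k 0 = dl.getD k 0 := by
  induction ps with
  | nil => intro dl; rfl
  | cons q ps ih =>
    intro dl
    rw [fphi, List.foldl_cons, ← fphi, ih (fun a ha => h a (List.mem_cons_of_mem _ ha))]
    exact updMult_getD_not_dvd dl q n k (h q List.mem_cons_self).1 (h q List.mem_cons_self).2

theorem pyRange_pairwise_lt (a b s : Int) (hs : 0 < s) :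
    (PySem.List.pyRange a b s).Pairwise (· < ·) := by
  rw [PySem.List.pyRange_of_pos _ _ hs]
  refine List.Pairwise.map _ ?_ List.pairwise_lt_range
  intro x y hxy
  have : (x:Int) < (y:Int) := by exact_mod_cast hxy
  nlinarith

theorem updMult_getD_dvd (dl : List Int) (q n : Int) (k : Nat)
    (hq : 2 ≤ q) (hd : q ∣ (k:Int)) (hk2 : 1 ≤ k) (hkn : (k:Int) ≤ n) (hlen : k < dl.length) :
    (updMult dl q n).getD k 0 = PySem.Int.floordiv (dl.getD k 0 * (q-1)) q := by
  have hqk : q ≤ (k:Int) := Int.le_of_dvd (by exact_mod_cast hk2) hd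
  have hmem : (k:Int) ∈ PySem.List.pyRange q (n+1) q := by
    rw [PySem.List.mem_pyRange_iff_of_pos (by omega)]
    refine ⟨hqk, by omega, ?_⟩
    exact dvd_sub hd dvd_rfl
  obtain ⟨m1, m2, hsplit⟩ := List.append_of_mem hmem
  have hpw := pyRange_pairwise_lt q (n+1) q (by omega)
  rw [hsplit] at hpw
  have hm1 : ∀ i ∈ m1, i < (k:Int) := by
    intro i hi
    have := (List.pairwise_append.mp hpw).2.2
    exact this i hi (k:Int) List.mem_cons_self
  have hm2 : ∀ i ∈ m2, (k:Int) < i := by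
    intro i hi
    exact List.rel_of_pairwise_cons (List.pairwise_append.mp hpw).2.1 hi
  unfold updMult
  rw [hsplit, List.foldl_append, List.foldl_cons]
  have hq0 : ∀ i ∈ PySem.List.pyRange q (n+1) q, q ≤ i := by
    intro i hi
    rw [PySem.List.mem_pyRange_iff_of_pos (by omega)] at hi
    exact hi.1
  have hne1 : ∀ i ∈ m1, i.toNat ≠ k := by
    intro i hi
    have hiq : q ≤ i := hq0 i (by rw [hsplit]; exact List.mem_append_left _ hi)
    have := hm1 i hi
    omega
  have hne2 : ∀ i ∈ m2, i.toNat ≠ k := by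
    intro i hi
    have hiq : q ≤ i := hq0 i (by rw [hsplit]; exact List.mem_append_right _ (List.mem_cons_of_mem _ hi))
    have := hm2 i hi
    omega
  have hfold1 : (m1.foldl (fun dl i => dl.set i.toNat (PySem.Int.floordiv (dl.getD i.toNat 0 * (q - 1)) q)) dl).getD k 0 = dl.getD k 0 :=
    foldl_set_getD m1 _ k hne1 dl
  set dl1 := m1.foldl (fun dl i => dl.set i.toNat (PySem.Int.floordiv (dl.getD i.toNat 0 * (q - 1)) q)) dl with hdl1
  rw [foldl_set_getD m2 _ k hne2]
  rw [show ((k:Int)).toNat = k from Int.toNat_natCast k]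
  have hlen1 : k < dl1.length := by
    rw [hdl1, foldl_set_length]
    exact hlen
  rw [List.getD_eq_getElem?_getD, List.getElem?_set_self (by omega), hfold1]
  rfl

theorem ofNat_cast (m : Nat) : Int.ofNat m = (m:Int) := rfl

theorem updMult_getD_le (dl : List Int) (q n : Int) (k : Nat)
    (hq : 2 ≤ q) (h0 : 0 ≤ dl.getD k 0) :
    0 ≤ (updMult dl q n).getD k 0 ∧ (updMult dl q n).getD k 0 ≤ dl.getD k 0 := by
  by_cases hdvd : q ∣ (k:Int)
  · by_cases hk0 : 1 ≤ k
    · by_cases hkn : (k:Int) ≤ n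
      · by_cases hlen : k < dl.length
        · rw [updMult_getD_dvd dl q n k hq hdvd hk0 hkn hlen]
          rw [PySem.Int.floordiv_eq_ediv_of_pos (by omega)]
          constructor
          · exact Int.ediv_nonneg (by nlinarith) (by omega)
          · calc dl.getD k 0 * (q-1) / q ≤ dl.getD k 0 * q / q := by
                  apply Int.ediv_le_ediv (by omega)
                  nlinarith
              _ = dl.getD k 0 := Int.mul_ediv_cancel _ (by omega)
        · have h1 : dl.getD k 0 = 0 := List.getD_eq_default _ _ (by omega)
          have h2 : (updMult dl q n).getD k 0 = 0 :=
            List.getD_eq_default _ _ (by rw [updMult_length]; omega)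
          rw [h1, h2]
          omega
      · -- k > n: k not in the update range
        have : (updMult dl q n).getD k 0 = dl.getD k 0 := by
          unfold updMult
          refine foldl_set_getD _ _ _ ?_ dl
          intro i hi hik
          rw [PySem.List.mem_pyRange_iff_of_pos (by omega)] at hi
          omega
        rw [this]; omega
    · -- k = 0: indices in the range are ≥ q ≥ 2
      have : (updMult dl q n).getD k 0 = dl.getD k 0 := by
        unfold updMult
        refine foldl_set_getD _ _ _ ?_ dl
        intro i hi hik
        rw [PySem.List.mem_pyRange_iff_of_pos (by omega)] at hi
        omega
      rw [this]; omega
  · rw [updMult_getD_not_dvd dl q n k hq hdvd]; omega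

theorem fphi_getD_le (n : Int) (ps : List Int) (k : Nat) (h2 : ∀ q ∈ ps, 2 ≤ q) :
    ∀ dl : List Int, 0 ≤ dl.getD k 0 →
      0 ≤ (fphi n dl ps).getD k 0 ∧ (fphi n dl ps).getD k 0 ≤ dl.getD k 0 := by
  induction ps with
  | nil => intro dl h0; exact ⟨h0, le_refl _⟩
  | cons q ps ih =>
    intro dl h0
    have hstep := updMult_getD_le dl q n k (h2 q List.mem_cons_self) h0
    have := ih (fun a ha => h2 a (List.mem_cons_of_mem _ ha)) (updMult dl q n) hstep.1
    rw [fphi, List.foldl_cons, ← fphi]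
    exact ⟨this.1, le_trans this.2 hstep.2⟩

theorem phi0_getD (N k : Nat) (hk : k ≤ N) :
    (((List.range (N+1)).map Int.ofNat)).getD k 0 = (k:Int) := by
  rw [List.getD_eq_getElem?_getD, List.getElem?_map, List.getElem?_range (by omega : k < N+1)]
  rfl

-- a prime a is untouched: phi[a] is still a
theorem phiVal_prime (n : Int) (a : Nat) (ha : Nat.Prime a) (haN : a ≤ n.toNat) :
    (fphi n ((List.range (n.toNat+1)).map Int.ofNat) (prl a)).getD a 0 = (a:Int) := by
  rw [fphi_getD_not_dvd n (prl a) a ?_ _, phi0_getD n.toNat a haN]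
  intro q hq
  obtain ⟨m, rfl, hm, hma⟩ := prl_mem a q hq
  refine ⟨Int.ofNat_le.mpr hm.two_le, ?_⟩
  intro hdvd
  have hnat : m ∣ a := by
    rw [ofNat_cast] at hdvd
    exact_mod_cast hdvd
  rcases (Nat.Prime.eq_one_or_self_of_dvd ha m hnat) with h | h
  · exact absurd h (by have := hm.two_le; omega)
  · omega

-- a composite a has been reduced: phi[a] < a
theorem phiVal_composite (n : Int) (a : Nat) (ha2 : 2 ≤ a) (ha : ¬ Nat.Prime a)
    (haN : a ≤ n.toNat) :
    (fphi n ((List.range (n.toNat+1)).map Int.ofNat) (prl a)).getD a 0 ≤ (a:Int) - 1 := by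
  set phi0 := (List.range (n.toNat+1)).map Int.ofNat with hphi0
  set q0 := a.minFac with hq0
  have hq0p : Nat.Prime q0 := Nat.minFac_prime (by omega)
  have hq0d : q0 ∣ a := Nat.minFac_dvd a
  have hq0lt : q0 < a := by
    rcases Nat.lt_or_ge q0 a with h | h
    · exact h
    · exfalso
      have : q0 ≤ a := Nat.le_of_dvd (by omega) hq0d
      have : q0 = a := by omega
      exact ha (this ▸ hq0p)
  have hmem : Int.ofNat q0 ∈ prl a := by
    rw [prl, List.mem_map]
    exact ⟨q0, by rw [List.mem_filter, List.mem_range]; exact ⟨hq0lt, by simpa using hq0p⟩, rfl⟩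
  obtain ⟨m1, m2, hsplit⟩ := List.append_of_mem hmem
  have hall : ∀ q ∈ prl a, 2 ≤ q := by
    intro q hq
    obtain ⟨m, rfl, hm, _⟩ := prl_mem a q hq
    exact Int.ofNat_le.mpr hm.two_le
  have hm1 : ∀ q ∈ m1, 2 ≤ q := fun q hq => hall q (by rw [hsplit]; exact List.mem_append_left _ hq)
  have hm2 : ∀ q ∈ m2, 2 ≤ q := fun q hq =>
    hall q (by rw [hsplit]; exact List.mem_append_right _ (List.mem_cons_of_mem _ hq))
  have h0a : phi0.getD a 0 = (a:Int) := phi0_getD n.toNat a haN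
  -- value after m1
  have hv1 := fphi_getD_le n m1 a hm1 phi0 (by rw [h0a]; omega)
  rw [h0a] at hv1
  set v1 := (fphi n phi0 m1).getD a 0 with hv1d
  -- the q0 update
  have hlen1 : a < (fphi n phi0 m1).length := by
    rw [fphi_length, hphi0, List.length_map, List.length_range]
    omega
  have hdvdI : (Int.ofNat q0) ∣ (a:Int) := by
    rw [ofNat_cast]
    exact_mod_cast hq0d
  have hupd := updMult_getD_dvd (fphi n phi0 m1) (Int.ofNat q0) n a
    (Int.ofNat_le.mpr hq0p.two_le) hdvdI (by omega) (by omega) hlen1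
  have hv2le : (updMult (fphi n phi0 m1) (Int.ofNat q0) n).getD a 0 ≤ (a:Int) - 1 := by
    have hq2 : (2:Int) ≤ (q0:Int) := by exact_mod_cast hq0p.two_le
    rw [hupd, ofNat_cast, PySem.Int.floordiv_eq_ediv_of_pos (by omega)]
    calc v1 * ((q0:Int)-1) / (q0:Int) ≤ ((a:Int)-1) * (q0:Int) / (q0:Int) := by
          apply Int.ediv_le_ediv (by omega)
          nlinarith [hv1.1, hv1.2]
      _ = (a:Int)-1 := Int.mul_ediv_cancel _ (by omega)
  have hv2ge : 0 ≤ (updMult (fphi n phi0 m1) (Int.ofNat q0) n).getD a 0 := by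
    exact (updMult_getD_le (fphi n phi0 m1) (Int.ofNat q0) n a
      (by rw [ofNat_cast]; exact_mod_cast hq0p.two_le) hv1.1).1
  -- the rest only decreases
  have hfinal := fphi_getD_le n m2 a hm2 (updMult (fphi n phi0 m1) (Int.ofNat q0) n) hv2ge
  have heq : fphi n phi0 (prl a) = fphi n (updMult (fphi n phi0 m1) (Int.ofNat q0) n) m2 := by
    rw [hsplit, fphi, List.foldl_append, List.foldl_cons]
    rfl
  rw [heq]
  exact le_trans hfinal.2 hv2le

theorem prl_two : prl 2 = [] := by decide

theorem prl_succ_of_prime (a : Nat) (h : Nat.Prime a) : prl (a+1) = prl a ++ [Int.ofNat a] := by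
  rw [prl, prl, List.range_succ, List.filter_append]
  simp [h]

theorem prl_succ_of_not_prime (a : Nat) (h : ¬ Nat.Prime a) : prl (a+1) = prl a := by
  rw [prl, prl, List.range_succ, List.filter_append]
  simp [h]

theorem fphi_append_one (n : Int) (dl : List Int) (ps : List Int) (q : Int) :
    fphi n dl (ps ++ [q]) = updMult (fphi n dl ps) q n := by
  rw [fphi, List.foldl_append, List.foldl_cons, List.foldl_nil]
  rfl

theorem foldB_main (n : Int) (hn : 2 ≤ n) : ∀ (c a : Nat), 2 ≤ a → a + c = n.toNat + 1 →
    List.foldl (stepB n) (fphi n ((List.range (n.toNat+1)).map Int.ofNat) (prl a))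
        (PySem.List.pyRange (a:Int) (n+1) 1)
      = fphi n ((List.range (n.toNat+1)).map Int.ofNat) (prl (n.toNat+1)) := by
  intro c
  induction c with
  | zero =>
    intro a h2a hsum
    rw [PySem.List.pyRange_one_eq_nil (by omega)]
    rw [List.foldl_nil, show a = n.toNat+1 by omega]
  | succ c ih =>
    intro a h2a hsum
    have haN : a ≤ n.toNat := by omega
    rw [PySem.List.pyRange_one_cons (by omega)]
    rw [List.foldl_cons]
    have hstep : stepB n (fphi n ((List.range (n.toNat+1)).map Int.ofNat) (prl a)) (a:Int)
        = fphi n ((List.range (n.toNat+1)).map Int.ofNat) (prl (a+1)) := by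
      rw [stepB]
      simp only [Int.toNat_natCast]
      by_cases hp : Nat.Prime a
      · simp only [phiVal_prime n a hp haN, BEq.rfl, if_true]
        rw [prl_succ_of_prime a hp, fphi_append_one]
        rfl
      · have hle := phiVal_composite n a h2a hp haN
        have hne : ((fphi n ((List.range (n.toNat+1)).map Int.ofNat) (prl a)).getD a 0 == (a:Int)) = false := by
          rw [beq_eq_false_iff_ne]
          omega
        simp only [hne, Bool.false_eq_true, if_false]
        rw [prl_succ_of_not_prime a hp]
    rw [hstep, show (a:Int) + 1 = ((a+1 : Nat) : Int) by push_cast; ring]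
    exact ih (a+1) (by omega) (by omega)

theorem foldB_eq (n : Int) (hn : 2 ≤ n) :
    List.foldl (stepB n) ((List.range (n.toNat+1)).map Int.ofNat) (PySem.List.pyRange 2 (n+1) 1)
      = fphi n ((List.range (n.toNat+1)).map Int.ofNat) (primeListPort n) := by
  have h := foldB_main n hn (n.toNat - 1) 2 (le_refl 2) (by omega)
  rw [show ((2:Nat):Int) = (2:Int) from rfl] at h
  rw [show fphi n ((List.range (n.toNat+1)).map Int.ofNat) (prl 2)
      = (List.range (n.toNat+1)).map Int.ofNat by rw [prl_two]; rfl] at h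
  rw [h, primeListPort_eq n hn]
  rfl

def stepA (n : Int) : (List Int × Int × List Int) → Int → (List Int × Int × List Int) :=
  fun st dv =>
    let dl := updMult st.1 dv n
    let e := emitWhile dl st.2.1 dv st.2.2
    (dl, e.1, e.2)

theorem totientList_eq_alt (n : Int) : totientList n = totientList_alt n := by
  by_cases h0 : n ≤ 0
  · unfold totientList totientList_alt
    rw [if_pos h0, if_pos h0]
  · by_cases h1 : n = 1
    · subst h1; decide
    · have hn : 2 ≤ n := by omega
      have hps := primeListPort_eq n hn
      set ps := primeListPort n with hpsd
      have hmem : ∀ p ∈ ps, 2 ≤ p ∧ p ≤ n := by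
        intro p hp
        rw [hps, List.mem_map] at hp
        obtain ⟨k, hk, rfl⟩ := hp
        rw [List.mem_filter, List.mem_range] at hk
        have h2k := Nat.Prime.two_le (by simpa using hk.2)
        constructor
        · exact Int.ofNat_le.mpr h2k
        · show (k:Int) ≤ n
          have : k ≤ n.toNat := by omega
          omega
      have hpw : ps.Pairwise (· < ·) := by
        rw [hps]
        refine List.Pairwise.map _ ?_ (List.pairwise_lt_range.filter _)
        intro a b hab
        exact Int.ofNat_lt.mpr hab
      set d0 := (List.range (n.toNat+1)).map Int.ofNat with hd0
      have hd1 : d0.getD 1 0 = 1 := by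
        rw [hd0, List.getD_eq_getElem?_getD, List.getElem?_map,
          List.getElem?_range (by omega : 1 < n.toNat+1)]
        rfl
      have hfoldA := foldA_spec n ps d0 2 [0, d0.getD 1 0] hpw
        (fun p hp => ⟨(hmem p hp).1, by have := (hmem p hp).1; omega⟩) (by omega)
      unfold totientList
      rw [if_neg h0, if_neg h1]
      show (emitWhile (List.foldl (stepA n) (d0, 2, [0, d0.getD 1 0]) ps).1
            (List.foldl (stepA n) (d0, 2, [0, d0.getD 1 0]) ps).2.1 n
            (List.foldl (stepA n) (d0, 2, [0, d0.getD 1 0]) ps).2.2).2 = totientList_alt n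
      rw [show List.foldl (stepA n) (d0, 2, [0, d0.getD 1 0]) ps
          = (fphi n d0 ps, ps.foldl (fun a p => max a (p+1)) 2,
             [0, d0.getD 1 0] ++ (PySem.List.pyRange 2 (ps.foldl (fun a p => max a (p+1)) 2) 1).map
               (fun i => (fphi n d0 ps).getD i.toNat 0)) from hfoldA]
      rw [emitWhile_spec]
      have hX2 : 2 ≤ ps.foldl (fun a p => max a (p+1)) 2 := foldl_max1_le_self ps 2
      have hXn : ps.foldl (fun a p => max a (p+1)) 2 ≤ n+1 :=
        foldl_max1_le ps 2 (n+1) (fun p hp => by have := (hmem p hp).2; omega) (by omega)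
      simp only
      rw [List.append_assoc, ← List.map_append,
        ← PySem.List.pyRange_one_append 2 (ps.foldl (fun a p => max a (p+1)) 2) (n+1) hX2 hXn]
      rw [hd1]
      -- B side
      unfold totientList_alt
      rw [if_neg h0]
      show _ = [0, 1] ++ (PySem.List.pyRange 2 (n+1) 1).map
        (fun k => (List.foldl (stepB n) d0 (PySem.List.pyRange 2 (n+1) 1)).getD k.toNat 0)
      rw [hd0, foldB_eq n hn]

-- ===== VERDICT (by name: the statement is the Claim_ definition above) =====
theorem totientList_spec : Claim_equal_totientList := by
  intro n _
  exact totientList_eq_alt n
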